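-- pv_equiv track=rewrite | github.com/project-synthesis/ProjectSynthesis | backend/app/services/heuristic_analyzer.py | _check_technical_disambiguation
-- ===== SOURCE A (Python) =====
-- _TECHNICAL_VERBS = frozenset({
--     "design", "create", "build", "set", "configure", "add", "implement",
--     "refactor", "debug", "migrate", "deploy", "test", "develop",
-- })
--
-- _TECHNICAL_NOUNS = frozenset({
--     "system", "service", "api", "endpoint", "schema", "database",
--     "middleware", "pipeline", "queue", "cache", "scheduler", "server",
--     "backend", "frontend", "module", "library", "framework", "migration",
--     "table", "index", "model", "route", "handler", "worker",
-- })
--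
-- def _check_technical_disambiguation(first_sentence: str) -> bool:
--     """Check if the first sentence contains a technical verb + noun pair.
--
--     Scans for any verb from _TECHNICAL_VERBS followed within 4 words by a
--     noun from _TECHNICAL_NOUNS. Handles articles/prepositions in between
--     (e.g., "design a REST api", "build the caching system").
--     Words are stripped of trailing punctuation before matching.
--     """
--     # Strip punctuation from each word so "system." matches "system"
--     words = [w.strip(".,;:!?()[]{}\"'") for w in first_sentence.split()]
--     for i, word in enumerate(words):
--         if word in _TECHNICAL_VERBS:
--             # Check next 4 words for a technical noun
--             for j in range(i + 1, min(i + 5, len(words))):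
--                 if words[j] in _TECHNICAL_NOUNS:
--                     return True
--     return False
-- ===== SOURCE B (Python) =====
-- _TECHNICAL_VERBS = frozenset({
--     "design", "create", "build", "set", "configure", "add", "implement",
--     "refactor", "debug", "migrate", "deploy", "test", "develop",
-- })
--
-- _TECHNICAL_NOUNS = frozenset({
--     "system", "service", "api", "endpoint", "schema", "database",
--     "middleware", "pipeline", "queue", "cache", "scheduler", "server",
--     "backend", "frontend", "module", "library", "framework", "migration",
--     "table", "index", "model", "route", "handler", "worker",
-- })
--
-- def _check_technical_disambiguation(first_sentence: str) -> bool: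
--     """Single left-to-right pass: remember the index of the most recent
--     technical verb; report True at the first technical noun within 4 words
--     of it."""
--     last_verb = -5  # sentinel: never within distance 4 of any index >= 0
--     for i, word in enumerate(w.strip(".,;:!?()[]{}\"'") for w in first_sentence.split()):
--         if word in _TECHNICAL_NOUNS and i - last_verb <= 4:
--             return True
--         if word in _TECHNICAL_VERBS:
--             last_verb = i
--     return False
-- ===== Notes on version B (the rewrite author's own statement) =====
-- stated objective: alternative
-- what changed: Replaced A's nested scan (for each verb, look ahead up to 4 words for a noun) by a single left-to-right pass that keeps only the index of the most recent technical verb and fires at the first noun within distance 4 of it.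
import Mathlib
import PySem

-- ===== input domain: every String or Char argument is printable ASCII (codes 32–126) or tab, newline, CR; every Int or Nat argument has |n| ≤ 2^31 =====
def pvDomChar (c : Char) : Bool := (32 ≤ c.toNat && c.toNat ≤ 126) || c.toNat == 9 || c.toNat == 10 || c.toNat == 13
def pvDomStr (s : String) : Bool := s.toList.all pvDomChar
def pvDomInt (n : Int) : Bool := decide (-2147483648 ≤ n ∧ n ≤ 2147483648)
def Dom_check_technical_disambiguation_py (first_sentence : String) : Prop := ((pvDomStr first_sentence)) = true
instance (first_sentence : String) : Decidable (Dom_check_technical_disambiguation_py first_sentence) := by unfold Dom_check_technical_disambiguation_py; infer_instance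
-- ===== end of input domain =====

-- B replaces A's verb-then-look-ahead nested scan by a single pass remembering the
-- index of the most recent technical verb (objective: alternative, same cost).

-- ===== PORT A =====
def pvVerbs : List String :=
  ["design", "create", "build", "set", "configure", "add", "implement",
   "refactor", "debug", "migrate", "deploy", "test", "develop"]

def pvNouns : List String :=
  ["system", "service", "api", "endpoint", "schema", "database",
   "middleware", "pipeline", "queue", "cache", "scheduler", "server",
   "backend", "frontend", "module", "library", "framework", "migration",
   "table", "index", "model", "route", "handler", "worker"]

-- words = [w.strip(".,;:!?()[]{}\"'") for w in first_sentence.split()]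
def pvWords (first_sentence : String) : List String :=
  (PySem.Str.split₀ first_sentence).map (fun w => PySem.Str.stripChars w ".,;:!?()[]{}\"'")

-- A's nested loop with early return, as an `any` over enumerate / range
def pvALoop (words : List String) : Bool :=
  (PySem.List.enumerate words).any (fun iw =>
    pvVerbs.contains iw.2 &&
    (PySem.List.pyRange (iw.1 + 1) (min (iw.1 + 5) (words.length : Int)) 1).any
      (fun j => pvNouns.contains (PySem.List.pyGetD words j "")))

def check_technical_disambiguation_py (first_sentence : String) : Bool :=
  pvALoop (pvWords first_sentence)

-- ===== PORT B =====
-- single pass; lastVerb = index of most recent technical verb (sentinel -5)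
def pvScan : List String → Int → Int → Bool
  | [], _, _ => false
  | w :: rest, i, lastVerb =>
    if pvNouns.contains w && decide (i - lastVerb ≤ 4) then true
    else pvScan rest (i + 1) (if pvVerbs.contains w then i else lastVerb)

def check_technical_disambiguation_py_alt (first_sentence : String) : Bool :=
  pvScan (pvWords first_sentence) 0 (-5)

-- ===== PRECONDITION & SPEC =====
def Spec_check_technical_disambiguation_py (first_sentence : String) (out : Bool) : Prop := out = check_technical_disambiguation_py_alt first_sentence
instance (first_sentence : String) (out : Bool) : Decidable (Spec_check_technical_disambiguation_py first_sentence out) := by unfold Spec_check_technical_disambiguation_py; infer_instance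

-- ===== CLAIM (what is proved, stated in full; the proofs are below) =====
def Claim_equal_check_technical_disambiguation_py : Prop := ∀ (first_sentence : String), Dom_check_technical_disambiguation_py first_sentence → Spec_check_technical_disambiguation_py first_sentence (check_technical_disambiguation_py first_sentence)

-- ===== LEMMAS AND PROOFS =====

-- common characterisation: a technical verb at e, a technical noun at d, 1 ≤ d - e ≤ 4
def pvHit (ws : List String) : Prop :=
  ∃ e d : Nat, e < d ∧ d ≤ e + 4 ∧ d < ws.length ∧
    pvVerbs.contains (ws.getD e "") = true ∧ pvNouns.contains (ws.getD d "") = true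

lemma pv_mem_enumerate_iff {α : Type} (ws : List α) (s : Int) (p : Int × α) :
    p ∈ PySem.List.enumerate ws s ↔
      ∃ k : Nat, ∃ h : k < ws.length, p.1 = s + k ∧ p.2 = ws[k] := by
  induction ws generalizing s with
  | nil => simp [PySem.List.enumerate_nil]
  | cons x xs ih =>
    rw [PySem.List.enumerate_cons]
    simp only [List.mem_cons, ih]
    constructor
    · rintro (rfl | ⟨k, h, h1, h2⟩)
      · exact ⟨0, by simp, by simp, by simp⟩
      · exact ⟨k + 1, by simpa using h, by push_cast; omega, by simpa using h2⟩
    · rintro ⟨k, h, h1, h2⟩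
      cases k with
      | zero => left; simp at h1 h2; cases p; simp_all
      | succ k =>
        right; exact ⟨k, by simpa using h, by push_cast at h1 ⊢; omega, by simpa using h2⟩

lemma pvALoop_iff (ws : List String) : pvALoop ws = true ↔ pvHit ws := by
  unfold pvALoop pvHit
  rw [List.any_eq_true]
  constructor
  · rintro ⟨p, hp, hcond⟩
    rw [pv_mem_enumerate_iff] at hp
    obtain ⟨k, hk, h1, h2⟩ := hp
    rw [Bool.and_eq_true, List.any_eq_true] at hcond
    obtain ⟨hverb, j, hj, hnoun⟩ := hcond
    rw [PySem.List.mem_pyRange_one] at hj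
    have h0j : 0 ≤ j := by omega
    have hjlen : j < (ws.length : Int) := by omega
    refine ⟨k, j.toNat, by omega, by omega, by omega, ?_, ?_⟩
    · rw [List.getD_eq_getElem _ _ hk, ← h2]; exact hverb
    · rw [List.getD_eq_getElem _ _ (by omega : j.toNat < ws.length)]
      rw [PySem.List.pyGetD_eq_getElem ws "" h0j hjlen] at hnoun
      exact hnoun
  · rintro ⟨e, d, hed, hd4, hdlen, hverb, hnoun⟩
    have helen : e < ws.length := by omega
    refine ⟨((e : Int), ws[e]), ?_, ?_⟩
    · rw [pv_mem_enumerate_iff]; exact ⟨e, helen, by simp, rfl⟩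
    · rw [Bool.and_eq_true, List.any_eq_true]
      refine ⟨by rw [List.getD_eq_getElem _ _ helen] at hverb; exact hverb, (d : Int), ?_, ?_⟩
      · rw [PySem.List.mem_pyRange_one]
        constructor
        · push_cast; omega
        · simp only [lt_min_iff]; omega
      · rw [PySem.List.pyGetD_eq_getElem ws "" (by omega) (by exact_mod_cast hdlen)]
        rw [List.getD_eq_getElem _ _ hdlen] at hnoun
        simpa using hnoun

-- B's invariant: on the remaining suffix starting at absolute index i, with lastVerb = lv < i
def pvQ (ws : List String) (i lv : Int) : Prop :=
  ∃ d : Nat, d < ws.length ∧ pvNouns.contains (ws.getD d "") = true ∧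
    (i + d - lv ≤ 4 ∨
     ∃ e : Nat, e < d ∧ d ≤ e + 4 ∧ pvVerbs.contains (ws.getD e "") = true)

lemma pvScan_iff (ws : List String) (i lv : Int) (hlt : lv < i) :
    pvScan ws i lv = true ↔ pvQ ws i lv := by
  induction ws generalizing i lv with
  | nil => simp [pvScan, pvQ]
  | cons w rest ih =>
    rw [pvScan]
    by_cases hc : pvNouns.contains w = true ∧ i - lv ≤ 4
    · simp only [hc.1, hc.2, decide_true, Bool.and_self, if_true]
      constructor
      · intro _
        exact ⟨0, by simp, by simpa using hc.1, Or.inl (by simpa using hc.2)⟩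
      · intro _; trivial
    · have hcond : (pvNouns.contains w && decide (i - lv ≤ 4)) = false := by
        rcases Bool.eq_false_or_eq_true (pvNouns.contains w) with h1 | h1
        · have h2 : ¬ (i - lv ≤ 4) := fun h => hc ⟨h1, h⟩
          simp [h2]
        · simp only [h1, Bool.false_and]
      rw [hcond, if_neg (by simp)]
      have hlt' : (if pvVerbs.contains w = true then i else lv) < i + 1 := by
        split <;> omega
      rw [ih (i + 1) _ hlt']
      unfold pvQ
      constructor
      · rintro ⟨d, hdlen, hnoun, hrest⟩
        refine ⟨d + 1, by simpa using hdlen, by simpa using hnoun, ?_⟩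
        rcases hrest with hleft | ⟨e, he, he4, hverb⟩
        · by_cases hv : pvVerbs.contains w = true
          · rw [if_pos hv] at hleft
            exact Or.inr ⟨0, by omega, by push_cast at hleft ⊢; omega, by simpa using hv⟩
          · rw [if_neg hv] at hleft
            exact Or.inl (by push_cast at hleft ⊢; omega)
        · exact Or.inr ⟨e + 1, by omega, by omega, by simpa using hverb⟩
      · rintro ⟨d, hdlen, hnoun, hrest⟩
        cases d with
        | zero =>
          exfalso
          rcases hrest with hleft | ⟨e, he, _, _⟩
          · exact hc ⟨by simpa using hnoun, by push_cast at hleft; omega⟩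
          · omega
        | succ d =>
          refine ⟨d, by simpa using hdlen, by simpa using hnoun, ?_⟩
          rcases hrest with hleft | ⟨e, he, he4, hverb⟩
          · by_cases hv : pvVerbs.contains w = true
            · rw [if_pos hv]; left; push_cast at hleft ⊢; omega
            · rw [if_neg hv]; left; push_cast at hleft ⊢; omega
          · cases e with
            | zero =>
              have hv : pvVerbs.contains w = true := by simpa using hverb
              rw [if_pos hv]; left; omega
            | succ e =>
              right; exact ⟨e, by omega, by omega, by simpa using hverb⟩

lemma pvScan_start_iff (ws : List String) : pvScan ws 0 (-5) = true ↔ pvHit ws := by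
  rw [pvScan_iff ws 0 (-5) (by omega)]
  unfold pvQ pvHit
  constructor
  · rintro ⟨d, hdlen, hnoun, hrest⟩
    rcases hrest with hleft | ⟨e, he, he4, hverb⟩
    · exfalso; omega
    · exact ⟨e, d, he, he4, hdlen, hverb, hnoun⟩
  · rintro ⟨e, d, he, he4, hdlen, hverb, hnoun⟩
    exact ⟨d, hdlen, hnoun, Or.inr ⟨e, he, he4, hverb⟩⟩

-- ===== VERDICT (by name: the statement is the Claim_ definition above) =====
theorem check_technical_disambiguation_py_spec : Claim_equal_check_technical_disambiguation_py := by
  intro s _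
  unfold Spec_check_technical_disambiguation_py check_technical_disambiguation_py
    check_technical_disambiguation_py_alt
  have h := (pvALoop_iff (pvWords s)).trans (pvScan_start_iff (pvWords s)).symm
  exact Bool.coe_iff_coe.mp h
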